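-- pv_equiv track=rewrite | github.com/S4ika/Stepik_py_tasks | py_gen/random_and_string.py | pass_checker
-- ===== SOURCE A (Python) =====
-- def pass_checker(password):
--     lowercase_lit = False
--     uppercase_lit = False
--     digit = False
--     for i in password:
--         if i.isnumeric():
--             digit = True
--         if i.isupper():
--             uppercase_lit = True
--         if i.islower():
--             lowercase_lit = True
--     return digit & lowercase_lit & uppercase_lit
-- ===== SOURCE B (Python) =====
-- def pass_checker(password):
--     return (any(c.isnumeric() for c in password)
--             and any(c.isupper() for c in password)
--             and any(c.islower() for c in password))
-- ===== Notes on version B (the rewrite author's own statement) =====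
-- stated objective: idiomatic
-- what changed: Replaces A's single interleaved loop maintaining three boolean flags with three independent short-circuiting any() scans, one per character class.
import Mathlib
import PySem

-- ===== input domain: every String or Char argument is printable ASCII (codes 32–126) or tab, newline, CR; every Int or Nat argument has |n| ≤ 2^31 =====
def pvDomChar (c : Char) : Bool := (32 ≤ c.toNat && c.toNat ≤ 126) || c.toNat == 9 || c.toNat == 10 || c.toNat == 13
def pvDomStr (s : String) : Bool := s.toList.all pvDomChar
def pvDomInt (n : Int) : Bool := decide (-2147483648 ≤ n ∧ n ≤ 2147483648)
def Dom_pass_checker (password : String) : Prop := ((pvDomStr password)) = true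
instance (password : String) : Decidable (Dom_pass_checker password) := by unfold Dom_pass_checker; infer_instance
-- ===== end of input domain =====

-- B replaces A's single loop updating three flags by three independent any() scans (idiomatic; same cost).
-- On the ASCII domain, str.isnumeric agrees with PySem.Chars.isdigit (exact there).

-- ===== PORT A =====
-- single pass over the characters, three boolean flags
def pass_checker (password : String) : Bool :=
  let st := password.toList.foldl
    (fun (st : Bool × Bool × Bool) i =>
      let (lowercase_lit, uppercase_lit, digit) := st
      let digit := if PySem.Chars.isdigit i then true else digit
      let uppercase_lit := if PySem.Chars.isupper i then true else uppercase_lit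
      let lowercase_lit := if PySem.Chars.islower i then true else lowercase_lit
      (lowercase_lit, uppercase_lit, digit))
    (false, false, false)
  st.2.2 && st.1 && st.2.1

-- ===== PORT B =====
-- three independent short-circuiting scans
def pass_checker_alt (password : String) : Bool :=
  password.toList.any PySem.Chars.isdigit
    && (password.toList.any PySem.Chars.isupper
        && password.toList.any PySem.Chars.islower)

-- ===== PRECONDITION & SPEC =====
def Spec_pass_checker (password : String) (out : Bool) : Prop := out = pass_checker_alt password
instance (password : String) (out : Bool) : Decidable (Spec_pass_checker password out) := by unfold Spec_pass_checker; infer_instance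

-- ===== CLAIM (what is proved, stated in full; the proofs are below) =====
def Claim_equal_pass_checker : Prop := ∀ (password : String), Dom_pass_checker password → Spec_pass_checker password (pass_checker password)

-- ===== LEMMAS AND PROOFS =====

-- loop invariant: the fold computes the 'or' of the starting flags with the three any-scans
theorem pass_checker_fold (l : List Char) (a b c : Bool) :
    l.foldl
      (fun (st : Bool × Bool × Bool) i =>
        let (lowercase_lit, uppercase_lit, digit) := st
        let digit := if PySem.Chars.isdigit i then true else digit
        let uppercase_lit := if PySem.Chars.isupper i then true else uppercase_lit
        let lowercase_lit := if PySem.Chars.islower i then true else lowercase_lit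
        (lowercase_lit, uppercase_lit, digit))
      (a, b, c)
    = (a || l.any PySem.Chars.islower, b || l.any PySem.Chars.isupper,
       c || l.any PySem.Chars.isdigit) := by
  induction l generalizing a b c with
  | nil => simp
  | cons x xs ih =>
    simp only [List.foldl_cons, List.any_cons, ih]
    split_ifs <;> simp_all

-- ===== VERDICT (by name: the statement is the Claim_ definition above) =====
theorem pass_checker_spec : Claim_equal_pass_checker := by
  intro password _
  unfold Spec_pass_checker pass_checker pass_checker_alt
  rw [pass_checker_fold]
  simp
  cases password.toList.any PySem.Chars.isdigit <;>
    cases password.toList.any PySem.Chars.isupper <;>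
    cases password.toList.any PySem.Chars.islower <;> rfl
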